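-- pv_equiv track=rewrite | github.com/ceekay218/MLBtoolz | streak_app.py | build_result_streaks
-- ===== SOURCE A (Python) =====
-- def build_result_streaks(game_stats):
--     streak = 0
--     streak_list = []
--     for v in game_stats["cleared"][::-1]:
--         streak = streak + 1 if v else 0
--         streak_list.append(streak)
--     game_stats["streak"] = list(reversed(streak_list))
--
--     current = 0
--     for v in game_stats["cleared"]:
--         if v:
--             current += 1
--         else:
--             break
--
--     past = []
--     temp = 0
--     for v in game_stats["cleared"][::-1]:
--         if v:
--             temp += 1
--         else:
--             if temp > 0:
--                 past.append(temp)
--             temp = 0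
--     if temp > 0:
--         past.append(temp)
--
--     return game_stats, current, past
-- ===== SOURCE B (Python) =====
-- def build_result_streaks(game_stats):
--     cleared = game_stats["cleared"]
--     # one left-to-right scan: run-length encode cleared by truthiness
--     runs = []
--     i, n = 0, len(cleared)
--     while i < n:
--         b = bool(cleared[i])
--         j = i + 1
--         while j < n and bool(cleared[j]) == b:
--             j += 1
--         runs.append((b, j - i))
--         i = j
--     streak = []
--     for t, l in runs:
--         streak.extend(range(l, 0, -1) if t else [0] * l)
--     game_stats["streak"] = streak
--     current = runs[0][1] if runs and runs[0][0] else 0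
--     past = [l for t, l in runs if t][::-1]
--     return game_stats, current, past
-- ===== Notes on version B (the rewrite author's own statement) =====
-- stated objective: alternative
-- what changed: A makes three separate passes over reversed copies of cleared (per-position streak counter, break-loop for current, flush-loop for past); B run-length encodes cleared by truthiness in one left-to-right scan and derives streak (descending range per truthy run, zeros per falsy run), current (first run's length if truthy) and past (truthy run lengths reversed) from the runs.
import Mathlib
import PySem

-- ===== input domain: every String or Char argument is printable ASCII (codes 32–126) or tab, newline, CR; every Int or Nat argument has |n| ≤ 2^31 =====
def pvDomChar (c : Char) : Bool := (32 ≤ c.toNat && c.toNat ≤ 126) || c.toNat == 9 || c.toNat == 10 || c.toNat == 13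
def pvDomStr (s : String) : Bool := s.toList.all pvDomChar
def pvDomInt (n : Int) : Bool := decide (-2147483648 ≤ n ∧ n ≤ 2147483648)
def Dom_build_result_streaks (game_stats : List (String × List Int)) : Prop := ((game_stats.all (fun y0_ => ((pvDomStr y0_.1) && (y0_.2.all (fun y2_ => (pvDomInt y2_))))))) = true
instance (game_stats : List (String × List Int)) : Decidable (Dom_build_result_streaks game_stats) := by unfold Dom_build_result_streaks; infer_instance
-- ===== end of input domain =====

-- B replaces A's three passes over reversed copies of cleared by ONE run-length encoding of
-- cleared and derives streak/current/past from the runs (objective: alternative decomposition).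
-- Both A and B mutate game_stats in place by assigning game_stats["streak"]; the equivalence
-- below covers the returned triple, whose first component is that mutated dict.

-- ===== PORT A =====
def build_result_streaks (game_stats : List (String × List Int)) : (List (String × List Int)) × Int × List Int :=
  let d := PySem.Dict.mk game_stats
  let cleared := d.getD "cleared" []        -- Python raises KeyError when "cleared" is absent: excluded by Pre_
  -- for v in cleared[::-1]: streak = streak+1 if v else 0; streak_list.append(streak)
  let p1 := cleared.reverse.foldl (fun (st : Int × List Int) v =>
      let s := if v ≠ 0 then st.1 + 1 else 0
      (s, st.2 ++ [s])) (0, [])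
  let d2 := d.insert "streak" p1.2.reverse
  -- for v in cleared: if v: current += 1 else break   (break modelled by a stopped flag)
  let cur := (cleared.foldl (fun (st : Int × Bool) v =>
      if st.2 then st
      else if v ≠ 0 then (st.1 + 1, st.2) else (st.1, true)) (0, false)).1
  -- for v in cleared[::-1]: if v: temp += 1 else (flush temp)  ; then final flush
  let p3 := cleared.reverse.foldl (fun (st : List Int × Int) v =>
      if v ≠ 0 then (st.1, st.2 + 1)
      else (if st.2 > 0 then st.1 ++ [st.2] else st.1, 0)) ([], 0)
  let past := if p3.2 > 0 then p3.1 ++ [p3.2] else p3.1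
  (d2.items, cur, past)

-- ===== PORT B =====
-- B's run-length encoder: outer while over run starts; the inner `while` that advances j over
-- equal-truthiness elements is the takeWhile, the remainder (i = j) is the dropWhile.
def rleRuns : List Int → List (Bool × Nat)
  | [] => []
  | v :: vs =>
    let b : Bool := v != 0
    ((b, (vs.takeWhile (fun x => (x != 0) == b)).length + 1)
      :: rleRuns (vs.dropWhile (fun x => (x != 0) == b)))
termination_by l => l.length
decreasing_by
  have := List.length_dropWhile_le (p := fun x => (x != 0) == b) (l := vs)
  simp; omega

-- streak.extend(range(l, 0, -1) if t else [0] * l)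
def runBlock (r : Bool × Nat) : List Int :=
  if r.1 then (List.range r.2).reverse.map (fun i => (i : Int) + 1) else List.replicate r.2 0

def build_result_streaks_alt (game_stats : List (String × List Int)) : (List (String × List Int)) × Int × List Int :=
  let d := PySem.Dict.mk game_stats
  let cleared := d.getD "cleared" []        -- Python raises KeyError when "cleared" is absent: excluded by Pre_
  let runs := rleRuns cleared
  let streak := runs.flatMap runBlock
  -- current = runs[0][1] if runs and runs[0][0] else 0
  let cur : Int := match runs with
    | (true, l) :: _ => (l : Int)
    | _ => 0
  -- past = [l for t, l in runs if t][::-1]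
  let past := (runs.filterMap (fun r => if r.1 then some ((r.2 : Int)) else none)).reverse
  ((d.insert "streak" streak).items, cur, past)

-- ===== PRECONDITION & SPEC =====
-- Pre_: the key "cleared" must be present; on any other input the Python A (and B) raises KeyError.
def Pre_build_result_streaks (game_stats : List (String × List Int)) : Prop :=
  (PySem.Dict.mk game_stats).contains "cleared" = true
instance (game_stats : List (String × List Int)) : Decidable (Pre_build_result_streaks game_stats) := by
  unfold Pre_build_result_streaks; infer_instance

def pvWitness_build_result_streaks : (List (String × List Int)) := [("cleared", [1, 0, 1, 1])]

def Spec_build_result_streaks (game_stats : List (String × List Int)) (out : (List (String × List Int)) × Int × List Int) : Prop := out = build_result_streaks_alt game_stats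
instance (game_stats : List (String × List Int)) (out : (List (String × List Int)) × Int × List Int) : Decidable (Spec_build_result_streaks game_stats out) := by unfold Spec_build_result_streaks; infer_instance

-- ===== CLAIM (what is proved, stated in full; the proofs are below) =====
def Claim_equal_build_result_streaks : Prop := ∀ (game_stats : List (String × List Int)), Dom_build_result_streaks game_stats → Pre_build_result_streaks game_stats → Spec_build_result_streaks game_stats (build_result_streaks game_stats)

-- ===== LEMMAS AND PROOFS =====

-- per-position streak values, recursively from the left: streak at v is 1 + streak of the next
-- position if v is truthy, else 0
def specStreak : List Int → List Int
  | [] => []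
  | v :: vs => (if v ≠ 0 then (specStreak vs).headD 0 + 1 else 0) :: specStreak vs

-- length of the leading truthy prefix
def specCur : List Int → Int
  | [] => 0
  | v :: vs => if v ≠ 0 then specCur vs + 1 else 0

-- truthy run lengths, left to right
def pf (l : List Int) : List Int :=
  (rleRuns l).filterMap (fun r => if r.1 then some ((r.2 : Int)) else none)

theorem rle_cons (v : Int) (vs : List Int) :
    rleRuns (v :: vs) =
      match rleRuns vs with
      | (b', l) :: r => if b' = (v != 0) then ((v != 0), l + 1) :: r else ((v != 0), 1) :: (b', l) :: r
      | [] => [((v != 0), 1)] := by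
  cases vs with
  | nil => simp [rleRuns]
  | cons w ws =>
    by_cases hw : (w != 0) = (v != 0)
    · simp [rleRuns, hw]
    · simp [rleRuns, hw]

theorem rle_head (w : Int) (ws : List Int) :
    ∃ k r, rleRuns (w :: ws) = ((w != 0), k + 1) :: r := by
  refine ⟨(ws.takeWhile (fun x => (x != 0) == (w != 0))).length,
    rleRuns (ws.dropWhile (fun x => (x != 0) == (w != 0))), ?_⟩
  simp [rleRuns]

-- ===== A-side characterizations =====

theorem A_streak (l : List Int) :
    l.reverse.foldl (fun (st : Int × List Int) v =>
      let s := if v ≠ 0 then st.1 + 1 else 0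
      (s, st.2 ++ [s])) (0, []) = ((specStreak l).headD 0, (specStreak l).reverse) := by
  induction l with
  | nil => simp [specStreak]
  | cons v vs ih =>
    simp only [List.reverse_cons, List.foldl_append, ih, List.foldl_cons, List.foldl_nil, specStreak]
    by_cases hv : v ≠ 0 <;> simp [hv]

theorem A_cur_stop (l : List Int) (n : Int) :
    l.foldl (fun (st : Int × Bool) v =>
      if st.2 then st
      else if v ≠ 0 then (st.1 + 1, st.2) else (st.1, true)) (n, true) = (n, true) := by
  induction l generalizing n with
  | nil => rfl
  | cons v vs ih => simpa using ih n

theorem A_cur (l : List Int) (n : Int) :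
    (l.foldl (fun (st : Int × Bool) v =>
      if st.2 then st
      else if v ≠ 0 then (st.1 + 1, st.2) else (st.1, true)) (n, false)).1 = n + specCur l := by
  induction l generalizing n with
  | nil => simp [specCur]
  | cons v vs ih =>
    rw [List.foldl_cons]
    have hred : (if (n, false).2 = true then (n, false)
        else if v ≠ 0 then ((n, false).1 + 1, (n, false).2) else ((n, false).1, true))
        = (if v ≠ 0 then (n + 1, false) else (n, true)) := by
      split_ifs <;> simp_all
    rw [hred]
    by_cases hv : v ≠ 0
    · rw [if_pos hv, ih]; simp [specCur, hv]; ring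
    · rw [if_neg hv, A_cur_stop]; simp [specCur, not_not.mp hv]

theorem A_past (l : List Int) :
    (l.headD 0 ≠ 0 →
      l.reverse.foldl (fun (st : List Int × Int) v =>
        if v ≠ 0 then (st.1, st.2 + 1)
        else (if st.2 > 0 then st.1 ++ [st.2] else st.1, 0)) ([], 0)
        = ((pf l).tail.reverse, (pf l).headD 0) ∧ 0 < (pf l).headD 0)
    ∧ (¬ (l.headD 0 ≠ 0) →
      l.reverse.foldl (fun (st : List Int × Int) v =>
        if v ≠ 0 then (st.1, st.2 + 1)
        else (if st.2 > 0 then st.1 ++ [st.2] else st.1, 0)) ([], 0)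
        = ((pf l).reverse, 0)) := by
  induction l with
  | nil => exact ⟨fun h => absurd rfl h, fun _ => by simp [pf, rleRuns]⟩
  | cons v vs ih =>
    have hstep : ∀ init, (v :: vs).reverse.foldl (fun (st : List Int × Int) v =>
        if v ≠ 0 then (st.1, st.2 + 1)
        else (if st.2 > 0 then st.1 ++ [st.2] else st.1, 0)) init
        = (fun (st : List Int × Int) v =>
        if v ≠ 0 then (st.1, st.2 + 1)
        else (if st.2 > 0 then st.1 ++ [st.2] else st.1, 0))
          (vs.reverse.foldl (fun (st : List Int × Int) v =>
        if v ≠ 0 then (st.1, st.2 + 1)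
        else (if st.2 > 0 then st.1 ++ [st.2] else st.1, 0)) init) v := by
      intro init; rw [List.reverse_cons, List.foldl_append]; rfl
    cases vs with
    | nil =>
      by_cases hv : v ≠ 0
      · refine ⟨fun _ => ?_, fun h => absurd (by simpa using hv) h⟩
        constructor
        · rw [hstep]; simp [pf, rleRuns, hv]
        · simp [pf, rleRuns, hv]
      · have hv0 : v = 0 := not_not.mp hv
        refine ⟨fun h => absurd (by simpa using hv0) h, fun _ => ?_⟩
        rw [hstep]; simp [pf, rleRuns, hv0]
    | cons w ws =>
      obtain ⟨k, r, hr⟩ := rle_head w ws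
      have hpfcons : pf (v :: w :: ws) = (rleRuns (v :: w :: ws)).filterMap
        (fun r => if r.1 then some ((r.2 : Int)) else none) := rfl
      by_cases hw : w ≠ 0
      · have hwb : (w != 0) = true := by simpa using hw
        have hIH := ih.1 (by simpa using hw)
        by_cases hv : v ≠ 0
        · -- both truthy: first run merges
          have hvb : (v != 0) = true := by simpa using hv
          have hrl : rleRuns (v :: w :: ws) = (true, k + 2) :: r := by
            rw [rle_cons, hr, hwb, hvb]; simp
          refine ⟨fun _ => ?_, fun h => absurd (by simpa using hv) h⟩
          have h1 : pf (v :: w :: ws) = ((k : Int) + 2) :: r.filterMap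
              (fun r => if r.1 then some ((r.2 : Int)) else none) := by
            rw [hpfcons, hrl]; simp
          have h2 : pf (w :: ws) = ((k : Int) + 1) :: r.filterMap
              (fun r => if r.1 then some ((r.2 : Int)) else none) := by
            unfold pf; rw [hr, hwb]; simp
          rw [hstep, hIH.1, h1, h2]
          refine ⟨by simp [hv]; ring, by simp; omega⟩
        · -- v falsy, w truthy: flush the first (truthy) run
          have hv0 : v = 0 := not_not.mp hv
          have hrl : rleRuns (v :: w :: ws) = (false, 1) :: (true, k + 1) :: r := by
            rw [rle_cons, hr, hwb]; simp [hv0]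
          refine ⟨fun h => absurd (by simpa using hv0) h, fun _ => ?_⟩
          have h2 : pf (w :: ws) = ((k : Int) + 1) :: r.filterMap
              (fun r => if r.1 then some ((r.2 : Int)) else none) := by
            unfold pf; rw [hr, hwb]; simp
          have h1 : pf (v :: w :: ws) = pf (w :: ws) := by
            rw [hpfcons, hrl]; unfold pf; rw [hr, hwb]; simp
          rw [hstep, hIH.1, h1, h2]
          have hpos : (0:Int) < (k:Int) + 1 := by omega
          simp [hv0, hpos]
      · have hw0 : w = 0 := not_not.mp hw
        have hwb : (w != 0) = false := by simp [hw0]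
        have hIH := ih.2 (by simp [hw0])
        by_cases hv : v ≠ 0
        · -- v truthy, w falsy: new truthy run of length 1
          have hvb : (v != 0) = true := by simpa using hv
          have hrl : rleRuns (v :: w :: ws) = (true, 1) :: (false, k + 1) :: r := by
            rw [rle_cons, hr, hwb, hvb]; simp
          refine ⟨fun _ => ?_, fun h => absurd (by simpa using hv) h⟩
          have h1 : pf (v :: w :: ws) = (1 : Int) :: pf (w :: ws) := by
            rw [hpfcons, hrl]; unfold pf; rw [hr, hwb]; simp
          have h2 : pf (w :: ws) = (rleRuns (w :: ws)).filterMap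
              (fun r => if r.1 then some ((r.2 : Int)) else none) := rfl
          rw [hstep, hIH, h1]
          exact ⟨by simp [hv], by simp⟩
        · -- both falsy: falsy runs merge, pf unchanged
          have hv0 : v = 0 := not_not.mp hv
          have hrl : rleRuns (v :: w :: ws) = (false, k + 2) :: r := by
            rw [rle_cons, hr, hwb]; simp [hv0]
          refine ⟨fun h => absurd (by simpa using hv0) h, fun _ => ?_⟩
          have h1 : pf (v :: w :: ws) = pf (w :: ws) := by
            rw [hpfcons, hrl]; unfold pf; rw [hr, hwb]; simp
          rw [hstep, hIH, h1]
          simp [hv0]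

-- ===== B-side characterizations =====

theorem specStreak_cons (v : Int) (vs : List Int) :
    specStreak (v :: vs) = (if v ≠ 0 then (specStreak vs).headD 0 + 1 else 0) :: specStreak vs := rfl

theorem runBlock_true_succ (n : Nat) :
    runBlock (true, n + 1) = ((n : Int) + 1) :: runBlock (true, n) := by
  simp [runBlock, List.range_succ]

theorem runBlock_false_succ (n : Nat) :
    runBlock (false, n + 1) = 0 :: runBlock (false, n) := by
  simp [runBlock, List.replicate_succ]

theorem B_streak (l : List Int) : (rleRuns l).flatMap runBlock = specStreak l := by
  induction l with
  | nil => simp [rleRuns, specStreak]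
  | cons v vs ih =>
    cases vs with
    | nil =>
      by_cases hv : v ≠ 0
      · simp [rleRuns, specStreak, hv, runBlock]
      · have hv0 : v = 0 := not_not.mp hv
        simp [rleRuns, specStreak, hv0, runBlock]
    | cons w ws =>
      obtain ⟨k, r, hr⟩ := rle_head w ws
      rw [hr] at ih
      by_cases hw : w ≠ 0
      · have hwb : (w != 0) = true := by simpa using hw
        rw [hwb] at hr ih
        by_cases hv : v ≠ 0
        · have hvb : (v != 0) = true := by simpa using hv
          have hrl : rleRuns (v :: w :: ws) = (true, k + 2) :: r := by
            rw [rle_cons, hr, hvb]; simp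
          have hhd : (specStreak (w :: ws)).headD 0 = (k : Int) + 1 := by
            rw [← ih]; simp [runBlock_true_succ]
          rw [hrl, List.flatMap_cons, show k + 2 = (k + 1) + 1 from rfl, runBlock_true_succ,
            specStreak_cons, hhd, if_pos hv, ← ih, List.flatMap_cons, List.cons_append]
          norm_num
        · have hv0 : v = 0 := not_not.mp hv
          have hrl : rleRuns (v :: w :: ws) = (false, 1) :: (true, k + 1) :: r := by
            rw [rle_cons, hr]; simp [hv0]
          rw [hrl, specStreak_cons, if_neg hv, ← ih]
          simp [runBlock, List.flatMap_cons]
      · have hw0 : w = 0 := not_not.mp hw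
        have hwb : (w != 0) = false := by simp [hw0]
        rw [hwb] at hr ih
        by_cases hv : v ≠ 0
        · have hvb : (v != 0) = true := by simpa using hv
          have hrl : rleRuns (v :: w :: ws) = (true, 1) :: (false, k + 1) :: r := by
            rw [rle_cons, hr, hvb]; simp
          have hhd : (specStreak (w :: ws)).headD 0 = 0 := by
            rw [← ih]; simp [runBlock_false_succ]
          rw [hrl, specStreak_cons, hhd, if_pos hv, ← ih]
          simp [runBlock, List.flatMap_cons]
        · have hv0 : v = 0 := not_not.mp hv
          have hrl : rleRuns (v :: w :: ws) = (false, k + 2) :: r := by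
            rw [rle_cons, hr]; simp [hv0]
          rw [hrl, List.flatMap_cons, show k + 2 = (k + 1) + 1 from rfl, runBlock_false_succ,
            specStreak_cons, if_neg hv, ← ih, List.flatMap_cons, List.cons_append]

theorem specCur_cons (v : Int) (vs : List Int) :
    specCur (v :: vs) = if v ≠ 0 then specCur vs + 1 else 0 := rfl

theorem B_cur (l : List Int) :
    (match rleRuns l with
      | (true, k) :: _ => (k : Int)
      | _ => 0) = specCur l := by
  induction l with
  | nil => simp [rleRuns, specCur]
  | cons v vs ih =>
    cases vs with
    | nil =>
      by_cases hv : v ≠ 0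
      · have hvb : (v != 0) = true := by simpa using hv
        simp [rleRuns, specCur, hv, hvb]
      · have hv0 : v = 0 := not_not.mp hv
        simp [rleRuns, specCur, hv0]
    | cons w ws =>
      obtain ⟨k, r, hr⟩ := rle_head w ws
      rw [hr] at ih
      by_cases hw : w ≠ 0
      · have hwb : (w != 0) = true := by simpa using hw
        rw [hwb] at hr ih
        by_cases hv : v ≠ 0
        · have hvb : (v != 0) = true := by simpa using hv
          have hrl : rleRuns (v :: w :: ws) = (true, k + 2) :: r := by
            rw [rle_cons, hr, hvb]; simp
          have ih' : specCur (w :: ws) = (k : Int) + 1 := by rw [← ih]; simp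
          rw [hrl, specCur_cons, if_pos hv, ih']
          show ((k + 2 : Nat) : Int) = (k : Int) + 1 + 1
          push_cast; ring
        · have hv0 : v = 0 := not_not.mp hv
          have hrl : rleRuns (v :: w :: ws) = (false, 1) :: (true, k + 1) :: r := by
            rw [rle_cons, hr]; simp [hv0]
          rw [hrl]; simp [specCur, hv0]
      · have hw0 : w = 0 := not_not.mp hw
        have hwb : (w != 0) = false := by simp [hw0]
        rw [hwb] at hr ih
        by_cases hv : v ≠ 0
        · have hvb : (v != 0) = true := by simpa using hv
          have hrl : rleRuns (v :: w :: ws) = (true, 1) :: (false, k + 1) :: r := by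
            rw [rle_cons, hr, hvb]; simp
          have h0 : specCur (w :: ws) = 0 := by rw [specCur_cons, if_neg hw]
          rw [hrl, specCur_cons, if_pos hv, h0]
          simp
        · have hv0 : v = 0 := not_not.mp hv
          have hrl : rleRuns (v :: w :: ws) = (false, k + 2) :: r := by
            rw [rle_cons, hr]; simp [hv0]
          rw [hrl]; simp [specCur, hv0]

-- ===== VERDICT (by name: the statement is the Claim_ definition above) =====
theorem build_result_streaks_spec : Claim_equal_build_result_streaks := by
  intro gs _ _
  unfold Spec_build_result_streaks build_result_streaks build_result_streaks_alt
  simp only []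
  set l := (PySem.Dict.mk gs).getD "cleared" [] with hl
  refine Prod.ext ?_ (Prod.ext ?_ ?_)
  · -- the "streak" value written into the dict
    simp only [A_streak, B_streak, List.reverse_reverse]
  · rw [A_cur l 0, ← B_cur l]; exact zero_add _
  · -- past
    have hrhs : (rleRuns l).filterMap (fun r => if r.1 then some ((r.2 : Int)) else none)
        = pf l := rfl
    by_cases hv : l.headD 0 ≠ 0
    · obtain ⟨hfold, hpos⟩ := (A_past l).1 hv
      rw [hfold]
      dsimp only
      rw [hrhs]
      cases hpf : pf l with
      | nil => rw [hpf] at hpos; simp at hpos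
      | cons a t =>
        rw [hpf] at hpos
        simp only [List.headD_cons] at hpos
        simp only [List.headD_cons, List.tail_cons]
        rw [if_pos hpos]
        exact (List.reverse_cons ..).symm
    · rw [(A_past l).2 hv]
      dsimp only
      rw [hrhs]
      simp
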